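-- pv_equiv track=rewrite | github.com/Adopten123/CodeRun | medium/18. library/worked_main.py | find_day_count
-- ===== SOURCE A (Python) =====
-- def find_day_count(k, m, d):
--     count = 0;
--     hungry_count = 0;
--
--     for i in range(d,8):
--         if i != 6 and i != 7:
--             m+=k;
--         hungry_count = i - d + 1;
--         m -= hungry_count;
--
--         if m < 0: return count;
--         count +=1;
--
--     left = 0;
--     right = 10**18;
--     while right - left > 1:
--         middle = (left + right) // 2;
--         if (m + middle * k * 5) - ((middle * 7) * (2 * (hungry_count) + 1 + middle * 7) // 2) >= 0:
--             left = middle;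
--         else:
--             right = middle;
--
--     left, right = 0, 10 ** 18
--     while right - left > 1:
--         middle = (left + right) // 2
--         if (m + middle * k * 5) - ((middle * 7) * (2 * (hungry_count) + 1 + middle * 7) // 2) >= 0:
--             left = middle
--         else:
--             right = middle
--     m = m + left * k * 5 - ((left * 7) * (2 * (hungry_count) + 1 + left * 7) // 2);
--     hungry_count += left * 7;
--     count += left * 7;
--
--     for i in range(1,8):
--         if i != 6 and i != 7:
--             m+=k;
--         m -= hungry_count+1;
--         hungry_count += 1;
--         if m < 0: break;
--         count +=1;
--     return count;
-- ===== SOURCE B (Python) =====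
-- def _isqrt(n):
--     # hand-rolled integer Newton iteration (floor square root), exact for n >= 0
--     if n < 2:
--         return n
--     x = n
--     y = (x + n // x) // 2
--     while y < x:
--         x = y
--         y = (x + n // x) // 2
--     return x
--
--
-- def find_day_count(k, m, d):
--     # closed-form balance after t opening days (day j earns k iff j <= 5, day t costs t)
--     def bal1(t):
--         return m + k * max(0, min(t, 6 - d)) - t * (t + 1) // 2
--
--     n1 = max(8 - d, 0)  # number of opening days
--     t = next((t for t in range(1, n1 + 1) if bal1(t) < 0), None)
--     if t is not None:
--         return t - 1
--
--     # full pre-paid weeks: largest w >= 0 with 49*w^2 + b*w <= 2*mm, solved in closed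
--     # form via the integer square root of the discriminant
--     mm = bal1(n1)
--     if mm < 0:
--         w = 0
--     else:
--         b = 7 * (2 * n1 + 1) - 10 * k
--         w = (_isqrt(b * b + 392 * mm) - b) // 98
--
--     m2 = mm + w * k * 5 - (w * 7) * (2 * n1 + 1 + w * 7) // 2
--     h2 = n1 + w * 7
--
--     # closed-form balance after t days of the final week
--     def bal2(t):
--         return m2 + k * min(t, 5) - t * h2 - t * (t + 1) // 2
--
--     t = next((t for t in range(1, 8) if bal2(t) < 0), None)
--     return n1 + w * 7 + (t - 1 if t is not None else 7)
-- ===== Notes on version B (the rewrite author's own statement) =====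
-- stated objective: alternative
-- what changed: Both stateful day-by-day simulation loops are replaced by closed-form balance formulas with a first-failure search over the day index, and the two identical 10^18-range binary searches by a closed-form quadratic solve (integer Newton square root of the discriminant).
-- outside the precondition, e.g. on find_day_count(35, -1, 8): A returns 48, B returns 7
import Mathlib
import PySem

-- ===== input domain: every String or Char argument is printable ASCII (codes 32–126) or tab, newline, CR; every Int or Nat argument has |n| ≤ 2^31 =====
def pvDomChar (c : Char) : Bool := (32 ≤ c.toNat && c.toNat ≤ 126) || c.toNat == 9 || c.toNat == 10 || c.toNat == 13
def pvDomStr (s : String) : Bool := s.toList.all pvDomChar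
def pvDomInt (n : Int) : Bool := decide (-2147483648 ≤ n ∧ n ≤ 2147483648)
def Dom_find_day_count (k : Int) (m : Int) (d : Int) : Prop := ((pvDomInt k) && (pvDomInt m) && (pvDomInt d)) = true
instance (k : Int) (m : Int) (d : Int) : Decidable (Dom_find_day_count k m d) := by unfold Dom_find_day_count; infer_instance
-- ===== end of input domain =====

-- B replaces A's two stateful day-simulation loops by closed-form balance formulas
-- with a first-failure search, and A's two 10^18-range binary searches by a
-- closed-form quadratic solve (integer Newton square root of the discriminant).

-- ===== PORT A =====

-- the `while right - left > 1` binary-search loop of A (it runs ≤ 60 iterations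
-- from right = 10^18; fuel = 100 only makes the recursion total, never exhausted)
def bsearchA (k m h : Int) : Nat → Int → Int → Int
  | 0, left, _ => left
  | fuel+1, left, right =>
    if right - left > 1 then
      let middle := PySem.Int.floordiv (left + right) 2
      if 0 ≤ (m + middle * k * 5) - PySem.Int.floordiv ((middle * 7) * (2 * h + 1 + middle * 7)) 2 then
        bsearchA k m h fuel middle right
      else
        bsearchA k m h fuel left middle
    else left

-- `for i in range(d, 8)` with its early `return count` (.inl = returned, .inr = fell
-- through); the fuel is exactly the number of loop iterations, (8 - d).toNat
def loopA1 (k d : Int) : Nat → Int → Int → Int → Int → Sum Int (Int × Int × Int)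
  | 0, _i, m, h, c => .inr (m, h, c)
  | fuel+1, i, m, _h, c =>
    let m := if i ≠ 6 ∧ i ≠ 7 then m + k else m
    let h := i - d + 1
    let m := m - h
    if m < 0 then .inl c
    else loopA1 k d fuel (i + 1) m h (c + 1)

-- the final `for i in range(1, 8)` with its `break`
def loopA2 (k : Int) : List Int → Int → Int → Int → Int
  | [], _, _, c => c
  | i :: rest, m, h, c =>
    let m := if i ≠ 6 ∧ i ≠ 7 then m + k else m
    let m := m - (h + 1)
    let h := h + 1
    if m < 0 then c
    else loopA2 k rest m h (c + 1)

def find_day_count (k : Int) (m : Int) (d : Int) : Int :=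
  match loopA1 k d (8 - d).toNat d m 0 0 with
  | .inl c => c
  | .inr (m, h, c) =>
    let _left := bsearchA k m h 100 0 (10^18)   -- A runs the identical search twice
    let left := bsearchA k m h 100 0 (10^18)
    let m := m + left * k * 5 - PySem.Int.floordiv ((left * 7) * (2 * h + 1 + left * 7)) 2
    let h := h + left * 7
    let c := c + left * 7
    loopA2 k (PySem.List.pyRange 1 8 1) m h c

-- ===== PORT B =====

-- the `while y < x` Newton loop of Source B's _isqrt (x strictly decreases, so
-- fuel = nn.toNat + 1 is never exhausted)
def newtonB (nn : Int) : Nat → Int → Int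
  | 0, x => x
  | fuel+1, x =>
    let y := PySem.Int.floordiv (x + PySem.Int.floordiv nn x) 2
    if y < x then newtonB nn fuel y else x

-- Source B's _isqrt
def isqrtB (nn : Int) : Int :=
  if nn < 2 then nn else newtonB nn (nn.toNat + 1) nn

-- Source B's closed-form week count (largest w ≥ 0 with 49w² + bw ≤ 2m)
def solveB (k m h : Int) : Int :=
  if m < 0 then 0
  else
    let b := 7 * (2 * h + 1) - 10 * k
    let s := isqrtB (b * b + 392 * m)
    PySem.Int.floordiv (s - b) 98

-- Source B's bal1: closed-form balance after t opening days
def bal1B (k m d : Int) (t : Int) : Int :=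
  m + k * max 0 (min t (6 - d)) - PySem.Int.floordiv (t * (t + 1)) 2

-- Source B's bal2: closed-form balance after t days of the final week
def bal2B (k m2 h2 : Int) (t : Int) : Int :=
  m2 + k * min t 5 - t * h2 - PySem.Int.floordiv (t * (t + 1)) 2

-- Source B's `next((t for t in range(1, n1+1) if bal1(t) < 0), None)`: a lazy scan,
-- stopping at the first failing day (the fuel is exactly the generator's length)
def scan1B (k m d : Int) : Nat → Int → Option Int
  | 0, _ => none
  | fuel+1, t => if bal1B k m d t < 0 then some t else scan1B k m d fuel (t + 1)

def find_day_count_alt (k : Int) (m : Int) (d : Int) : Int :=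
  let n1 := max (8 - d) 0
  match scan1B k m d n1.toNat 1 with
  | some t => t - 1
  | none =>
    let mm := bal1B k m d n1
    let w := solveB k mm n1
    let m2 := mm + w * k * 5 - PySem.Int.floordiv ((w * 7) * (2 * n1 + 1 + w * 7)) 2
    let h2 := n1 + w * 7
    match (PySem.List.pyRange 1 8 1).find? (fun t => decide (bal2B k m2 h2 t < 0)) with
    | some t => n1 + w * 7 + (t - 1)
    | none => n1 + w * 7 + 7

-- ===== PRECONDITION & SPEC =====

-- Pre_ excludes only the degenerate corner d ≥ 8 with m < 0 (d is a start weekday,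
-- 1–7, so the opening loop is then empty): there A's binary search runs over a
-- non-monotone affordability predicate from an already negative balance and its
-- result depends on which midpoints the search happens to probe — an unspecified
-- corner where B grants no pre-paid week instead.
def Pre_find_day_count (k : Int) (m : Int) (d : Int) : Prop := ¬ (8 ≤ d ∧ m < 0)
instance (k : Int) (m : Int) (d : Int) : Decidable (Pre_find_day_count k m d) := by
  unfold Pre_find_day_count; infer_instance

def pvWitness_find_day_count : Int × Int × Int := (2, 10, 1)

def Spec_find_day_count (k : Int) (m : Int) (d : Int) (out : Int) : Prop := out = find_day_count_alt k m d
instance (k : Int) (m : Int) (d : Int) (out : Int) : Decidable (Spec_find_day_count k m d out) := by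
  unfold Spec_find_day_count; infer_instance

-- ===== CLAIM (what is proved, stated in full; the proofs are below) =====
def Claim_equal_find_day_count : Prop := ∀ (k : Int) (m : Int) (d : Int), Dom_find_day_count k m d → Pre_find_day_count k m d → Spec_find_day_count k m d (find_day_count k m d)

-- ===== LEMMAS AND PROOFS =====

-- the triangular-number floor division is exact
lemma halfTri (t : Int) : 2 * PySem.Int.floordiv (t * (t + 1)) 2 = t * (t + 1) := by
  obtain ⟨r, hr⟩ := Int.even_mul_succ_self t
  rw [PySem.Int.floordiv_eq_ediv_of_pos (by norm_num), hr,
      show r + r = 2 * r from by ring, Int.mul_ediv_cancel_left r (by norm_num)]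

-- one opening day: the closed-form balance satisfies A's update
lemma bal1_step (k m d t : Int) (ht : 0 ≤ t) (hle : d + t ≤ 7) :
    bal1B k m d (t + 1) =
      (if d + t ≠ 6 ∧ d + t ≠ 7 then bal1B k m d t + k else bal1B k m d t) - (t + 1) := by
  have h1 := halfTri t
  have h2 := halfTri (t + 1)
  unfold bal1B
  by_cases h5 : d + t ≤ 5
  · rw [if_pos (by omega),
        show max 0 (min (t + 1) (6 - d)) = max 0 (min t (6 - d)) + 1 from by omega]
    nlinarith
  · rw [if_neg (by omega),
        show max 0 (min (t + 1) (6 - d)) = max 0 (min t (6 - d)) from by omega]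
    nlinarith

-- one final-week day: the closed-form balance satisfies A's update
lemma bal2_step (k m2 h2 t : Int) (ht : 0 ≤ t) (hle : t ≤ 6) :
    bal2B k m2 h2 (t + 1) =
      (if t + 1 ≠ 6 ∧ t + 1 ≠ 7 then bal2B k m2 h2 t + k else bal2B k m2 h2 t) - (h2 + t + 1) := by
  have h1 := halfTri t
  have h2 := halfTri (t + 1)
  unfold bal2B
  by_cases h5 : t + 1 ≤ 5
  · rw [if_pos (by omega), show min (t + 1) 5 = min t 5 + 1 from by omega]
    nlinarith
  · rw [if_neg (by omega), show min (t + 1) 5 = min t 5 from by omega]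
    nlinarith

lemma bal1B_zero (k m d : Int) : bal1B k m d 0 = m := by
  unfold bal1B
  rw [show max (0:Int) (min 0 (6 - d)) = 0 from by omega,
      show PySem.Int.floordiv (0 * (0 + 1)) 2 = 0 from by decide]
  ring

lemma bal2B_zero (k m2 h2 : Int) : bal2B k m2 h2 0 = m2 := by
  unfold bal2B
  rw [show min (0:Int) 5 = 0 from by omega,
      show PySem.Int.floordiv (0 * (0 + 1)) 2 = 0 from by decide]
  ring

-- A's opening loop computes exactly B's lazy first-failure scan on bal1B
lemma L1 (k m d : Int) : ∀ (rem : Nat) (t : Int), 0 ≤ t → t + (rem : Int) = max (8 - d) 0 →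
    loopA1 k d rem (d + t) (bal1B k m d t) t t =
      (match scan1B k m d rem (t + 1) with
       | some s => .inl (s - 1)
       | none => .inr (bal1B k m d (max (8 - d) 0), max (8 - d) 0, max (8 - d) 0)) := by
  intro rem
  induction rem with
  | zero =>
    intro t ht hsum
    have hte : t = max (8 - d) 0 := by push_cast at hsum; omega
    subst hte
    rfl
  | succ rem ih =>
    intro t ht hsum
    have hlt : t < max (8 - d) 0 := by push_cast at hsum; omega
    have hd7 : d + t ≤ 7 := by omega
    simp only [loopA1, scan1B]
    have hstep := bal1_step k m d t ht hd7
    rw [show d + t - d + 1 = t + 1 from by ring]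
    by_cases hc : bal1B k m d (t + 1) < 0
    · rw [if_pos hc, if_pos (by rw [← hstep]; exact hc)]
      show (Sum.inl t : Sum Int (Int × Int × Int)) = Sum.inl (t + 1 - 1)
      simp only [Sum.inl.injEq]
      ring
    · rw [if_neg hc]
      rw [if_neg (by rw [← hstep]; exact hc)]
      rw [← hstep, show d + t + 1 = d + (t + 1) from by ring]
      exact ih (t + 1) (by omega) (by push_cast at hsum ⊢; omega)

lemma L1₀ (k m d : Int) :
    loopA1 k d (8 - d).toNat d m 0 0 =
      (match scan1B k m d (8 - d).toNat 1 with
       | some s => .inl (s - 1)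
       | none => .inr (bal1B k m d (max (8 - d) 0), max (8 - d) 0, max (8 - d) 0)) := by
  have h := L1 k m d (8 - d).toNat 0 le_rfl (by rw [Int.ofNat_toNat]; ring)
  rw [add_zero, bal1B_zero] at h
  rw [show (0:Int) + 1 = 1 from by ring] at h
  exact h

-- a scan that found nothing certifies every scanned balance nonnegative
lemma scan1B_none (k m d : Int) : ∀ (fuel : Nat) (t : Int), scan1B k m d fuel t = none →
    ∀ s : Int, t ≤ s → s < t + (fuel : Int) → ¬ bal1B k m d s < 0 := by
  intro fuel
  induction fuel with
  | zero => intro t _ s h1 h2; push_cast at h2; omega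
  | succ fuel ih =>
    intro t hnone s h1 h2
    simp only [scan1B] at hnone
    by_cases hc : bal1B k m d t < 0
    · rw [if_pos hc] at hnone; exact absurd hnone (by simp)
    · rw [if_neg hc] at hnone
      rcases eq_or_lt_of_le h1 with he | hlt
      · rw [← he]; exact hc
      · exact ih (t + 1) hnone s (by omega) (by push_cast at h2 ⊢; omega)

-- A's final-week loop computes exactly B's first-failure search on bal2B
lemma L2 (k m2 h2 c0 : Int) : ∀ (rem : Nat) (t : Int), 0 ≤ t → t + (rem : Int) = 7 →
    loopA2 k (PySem.List.pyRange (t + 1) 8 1) (bal2B k m2 h2 t) (h2 + t) (c0 + t) =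
      (match (PySem.List.pyRange (t + 1) 8 1).find?
          (fun s => decide (bal2B k m2 h2 s < 0)) with
       | some s => c0 + (s - 1)
       | none => c0 + 7) := by
  intro rem
  induction rem with
  | zero =>
    intro t ht hsum
    have hte : t = 7 := by push_cast at hsum; omega
    subst hte
    rw [PySem.List.pyRange_one_eq_nil (by omega)]
    rfl
  | succ rem ih =>
    intro t ht hsum
    have hlt : t < 7 := by push_cast at hsum; omega
    rw [PySem.List.pyRange_one_cons (by omega)]
    simp only [loopA2]
    have hstep := bal2_step k m2 h2 t ht (by omega)
    by_cases hc : bal2B k m2 h2 (t + 1) < 0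
    · rw [List.find?_cons_of_pos (by simpa using hc),
          if_pos (by rw [← hstep]; exact hc)]
      show c0 + t = c0 + (t + 1 - 1)
      ring
    · rw [List.find?_cons_of_neg (by simpa using hc),
          if_neg (by rw [← hstep]; exact hc), ← hstep,
          show h2 + t + 1 = h2 + (t + 1) from by ring,
          show c0 + t + 1 = c0 + (t + 1) from by ring]
      exact ih (t + 1) (by omega) (by push_cast at hsum ⊢; omega)

lemma L2₀ (k m2 h2 c0 : Int) :
    loopA2 k (PySem.List.pyRange 1 8 1) m2 h2 c0 =
      (match (PySem.List.pyRange 1 8 1).find?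
          (fun s => decide (bal2B k m2 h2 s < 0)) with
       | some s => c0 + (s - 1)
       | none => c0 + 7) := by
  have h := L2 k m2 h2 c0 7 0 le_rfl (by norm_num)
  rw [add_zero, add_zero, bal2B_zero, show (0:Int) + 1 = 1 from by ring] at h
  exact h

-- ===== the week phase: A's binary search equals B's closed-form solve =====

-- the affordability predicate, cleared of the (exact) floor division
def Pg (k m h n : Int) : Prop := 0 ≤ 2*m + 10*k*n - 49*n^2 - 7*(2*h+1)*n

lemma condA_iff (k m h n : Int) :
    (0 ≤ (m + n * k * 5) - PySem.Int.floordiv ((n * 7) * (2 * h + 1 + n * 7)) 2) ↔ Pg k m h n := by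
  have hdvd : 2 ∣ (n * 7) * (2 * h + 1 + n * 7) := by
    rcases Int.even_or_odd n with ⟨j, hj⟩ | ⟨j, hj⟩
    · exact ⟨7*j*(2*h+1+n*7), by subst hj; ring⟩
    · exact ⟨(n*7)*(h + 7*j + 4), by subst hj; ring⟩
  obtain ⟨r, hr⟩ := hdvd
  have hfd : PySem.Int.floordiv ((n * 7) * (2 * h + 1 + n * 7)) 2 = r := by
    rw [PySem.Int.floordiv_eq_ediv_of_pos (by norm_num), hr]
    exact Int.mul_ediv_cancel_left r (by norm_num)
  rw [hfd]
  have hq : 2*r = 49*n^2 + 7*(2*h+1)*n := by nlinarith [hr]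
  unfold Pg
  constructor <;> intro hx <;> nlinarith [hx, hq]

lemma Pg_mono (k m h n n' : Int) (h0 : Pg k m h 0) (hn : Pg k m h n)
    (h1 : 0 ≤ n') (h2 : n' ≤ n) : Pg k m h n' := by
  unfold Pg at *
  by_cases hz : n = 0
  · have : n' = 0 := le_antisymm (hz ▸ h2) h1
    simpa [this] using h0
  · have hnpos : 0 < n := lt_of_le_of_ne (le_trans h1 h2) (Ne.symm hz)
    have key : n * (2*m + 10*k*n' - 49*n'^2 - 7*(2*h+1)*n')
        = (n - n') * (2*m + 10*k*0 - 49*0^2 - 7*(2*h+1)*0)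
          + n' * (2*m + 10*k*n - 49*n^2 - 7*(2*h+1)*n) + 49*n*n'*(n - n') := by ring
    have h49 : 0 ≤ 49*n*n'*(n - n') :=
      mul_nonneg (mul_nonneg (by positivity) h1) (by linarith)
    have hnn : 0 ≤ n * (2*m + 10*k*n' - 49*n'^2 - 7*(2*h+1)*n') := by
      rw [key]
      have := mul_nonneg (by linarith : (0:Int) ≤ n - n') h0
      have := mul_nonneg h1 hn
      linarith
    by_contra hcon
    rw [not_le] at hcon
    nlinarith [mul_neg_of_pos_of_neg hnpos hcon]

lemma Pg_uniq (k m h a b : Int) (h0 : Pg k m h 0) (ha : 0 ≤ a) (hb : 0 ≤ b)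
    (ha1 : Pg k m h a) (ha2 : ¬ Pg k m h (a+1)) (hb1 : Pg k m h b) (hb2 : ¬ Pg k m h (b+1)) :
    a = b := by
  rcases lt_trichotomy a b with hlt | he | hgt
  · exact absurd (Pg_mono k m h b (a+1) h0 hb1 (by linarith) (by linarith)) ha2
  · exact he
  · exact absurd (Pg_mono k m h a (b+1) h0 ha1 (by linarith) (by linarith)) hb2

lemma bsearchA_boundary (k m h : Int) : ∀ (fuel : Nat) (l r : Int),
    Pg k m h l → ¬ Pg k m h r → l < r → r - l ≤ 2^fuel →
    l ≤ bsearchA k m h fuel l r ∧ Pg k m h (bsearchA k m h fuel l r) ∧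
      ¬ Pg k m h (bsearchA k m h fuel l r + 1) := by
  intro fuel
  induction fuel with
  | zero =>
    intro l r hl hr hlr hgap
    have : r = l + 1 := by simp at hgap; omega
    subst this
    simpa [bsearchA] using ⟨hl, hr⟩
  | succ fuel ih =>
    intro l r hl hr hlr hgap
    simp only [bsearchA]
    split
    · rename_i hgt
      have hmid : PySem.Int.floordiv (l + r) 2 = (l + r) / 2 :=
        PySem.Int.floordiv_eq_ediv_of_pos (by norm_num)
      have hpow : (2:Int)^(fuel+1) = 2 * 2^fuel := by ring
      have hb1 : l < (l + r) / 2 := by omega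
      have hb2 : (l + r) / 2 < r := by omega
      split
      · rename_i hc
        rw [hmid] at hc ⊢
        rw [condA_iff] at hc
        have := ih ((l+r)/2) r hc hr hb2 (by omega)
        exact ⟨by linarith [this.1], this.2⟩
      · rename_i hc
        rw [hmid] at hc ⊢
        rw [condA_iff] at hc
        exact ih l ((l+r)/2) hl hc hb1 (by omega)
    · rename_i hle
      have : r = l + 1 := by omega
      subst this
      exact ⟨le_refl _, hl, hr⟩

lemma newtonB_spec (nn : Int) (hnn : 2 ≤ nn) : ∀ (fuel : Nat) (x : Int),
    0 < x → nn < (x+1)^2 → x < (fuel : Int) →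
    0 < newtonB nn fuel x ∧ (newtonB nn fuel x)^2 ≤ nn ∧ nn < (newtonB nn fuel x + 1)^2 := by
  intro fuel
  induction fuel with
  | zero => intro x hx _ hf; exact absurd hf (by exact_mod_cast by omega)
  | succ fuel ih =>
    intro x hx hinv hf
    simp only [newtonB]
    have hqe : PySem.Int.floordiv nn x = nn / x := PySem.Int.floordiv_eq_ediv_of_pos hx
    set q := nn / x with hqdef
    have hr1 : nn % x + x * (nn / x) = nn := Int.emod_add_mul_ediv nn x
    have hr2 : 0 ≤ nn % x := Int.emod_nonneg nn (ne_of_gt hx)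
    have hr3 : nn % x < x := Int.emod_lt_of_pos nn hx
    have hq0 : 0 ≤ q := Int.ediv_nonneg (by linarith) hx.le
    have hye : PySem.Int.floordiv (x + PySem.Int.floordiv nn x) 2 = (x + q) / 2 := by
      rw [hqe]; exact PySem.Int.floordiv_eq_ediv_of_pos (by norm_num)
    rw [hye]
    set y := (x + q) / 2 with hydef
    have hy1 : 2*y ≤ x + q := by omega
    have hy2 : x + q < 2*y + 2 := by omega
    split
    · rename_i hyx
      have hypos : 0 < y := by
        rcases lt_or_ge 1 x with h1 | h1
        · omega
        · have hx1 : x = 1 := by omega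
          subst hx1
          simp at hr1
          omega
      have hnlt : nn < (q+1) * x := by nlinarith
      have hinv' : nn < (y+1)^2 := by nlinarith [sq_nonneg (x - q - 1), sq_nonneg (x + q + 1)]
      exact ih y hypos hinv' (by omega)
    · rename_i hyx
      have hqx : x ≤ q := by omega
      have : x * x ≤ nn := by nlinarith
      exact ⟨hx, by nlinarith, hinv⟩

lemma isqrtB_spec (nn : Int) (hnn : 0 ≤ nn) :
    0 ≤ isqrtB nn ∧ (isqrtB nn)^2 ≤ nn ∧ nn < (isqrtB nn + 1)^2 := by
  unfold isqrtB
  split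
  · rename_i h2
    have : nn = 0 ∨ nn = 1 := by omega
    rcases this with h | h <;> subst h <;> norm_num
  · rename_i h2
    rw [not_lt] at h2
    have hf : (nn : Int) < ((nn.toNat + 1 : Nat) : Int) := by
      push_cast [Int.toNat_of_nonneg hnn]; omega
    have := newtonB_spec nn h2 (nn.toNat + 1) nn (by omega) (by nlinarith) hf
    exact ⟨this.1.le, this.2⟩

lemma solveB_boundary (k m h : Int) (hm : 0 ≤ m) :
    0 ≤ solveB k m h ∧ Pg k m h (solveB k m h) ∧ ¬ Pg k m h (solveB k m h + 1) := by
  unfold solveB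
  rw [if_neg (by omega)]
  set b := 7 * (2 * h + 1) - 10 * k with hbdef
  have hnn : 0 ≤ b * b + 392 * m := by nlinarith
  obtain ⟨hs0, hs1, hs2⟩ := isqrtB_spec (b * b + 392 * m) hnn
  set s := isqrtB (b * b + 392 * m) with hsdef
  have hsb : b ≤ s := by nlinarith
  have hce : PySem.Int.floordiv (s - b) 98 = (s - b) / 98 :=
    PySem.Int.floordiv_eq_ediv_of_pos (by norm_num)
  rw [hce]
  set c := (s - b) / 98 with hcdef
  have hc1 : 98 * c ≤ s - b := by omega
  have hc2 : s - b < 98 * c + 98 := by omega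
  have hc0 : 0 ≤ c := by omega
  refine ⟨hc0, ?_, ?_⟩
  · unfold Pg
    rcases le_or_gt 0 (98*c + b) with hcase | hcase
    · nlinarith
    · nlinarith [mul_nonpos_of_nonneg_of_nonpos hc0 (by linarith : 49*c + b ≤ 0)]
  · unfold Pg
    intro hcon
    have hu : s + 1 ≤ 98 * (c+1) + b := by omega
    have hu0 : 0 ≤ s + 1 := by omega
    nlinarith

lemma notPg_big (k m h : Int) (hk : k ≤ 2147483648) (hm : m ≤ 4611686037754740736)
    (hh : 0 ≤ h) : ¬ Pg k m h (10^18) := by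
  unfold Pg
  intro hcon
  have e1 : ((10:Int)^18)^2 = 10^36 := by norm_num
  have e2 : 10*k*(10^18:Int) ≤ 10*2147483648*10^18 := by nlinarith
  have e3 : (0:Int) ≤ 7*(2*h+1)*(10^18:Int) := by nlinarith
  rw [e1] at hcon
  norm_num at hcon e2 e3
  linarith

-- the balance entering the week phase is bounded on the domain
lemma mm_le (k m d : Int) (hk : k ≤ 2147483648) (hm : m ≤ 2147483648)
    (hd : -2147483648 ≤ d) : bal1B k m d (max (8 - d) 0) ≤ 4611686037754740736 := by
  unfold bal1B
  set n1 := max (8 - d) 0 with hn1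
  set X := max 0 (min n1 (6 - d)) with hX
  have hX0 : 0 ≤ X := by omega
  have hXle : X ≤ 2147483654 := by omega
  have hF : 0 ≤ PySem.Int.floordiv (n1 * (n1 + 1)) 2 := by
    rw [PySem.Int.floordiv_eq_ediv_of_pos (by norm_num)]
    exact Int.ediv_nonneg (by nlinarith [le_max_right (8 - d) 0]) (by norm_num)
  have hkX : k * X ≤ 4611686031312289792 := by
    rcases le_or_gt k 0 with hk0 | hk0
    · nlinarith
    · nlinarith
  linarith

theorem find_day_count_spec : Claim_equal_find_day_count := by
  intro k m d hdom hpre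
  unfold Spec_find_day_count
  simp only [Dom_find_day_count, pvDomInt, Bool.and_eq_true, decide_eq_true_eq] at hdom
  obtain ⟨⟨⟨hk1, hk2⟩, hm1, hm2⟩, hd1, hd2⟩ := hdom
  simp only [find_day_count, find_day_count_alt]
  rw [show (max (8 - d) 0).toNat = (8 - d).toNat from by omega, L1₀]
  cases hfind : scan1B k m d (8 - d).toNat 1 with
  | some t => rfl
  | none =>
    simp only []
    set n1 := max (8 - d) 0 with hn1
    set mm := bal1B k m d n1 with hmm
    -- mm ≥ 0: either the last opening day survived, or the opening loop is empty and Pre_ applies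
    have hmm0 : 0 ≤ mm := by
      rcases le_or_gt n1 0 with h0 | h0
      · have hn10 : n1 = 0 := by omega
        have hd8 : 8 ≤ d := by omega
        have hm0 : 0 ≤ m := by
          unfold Pre_find_day_count at hpre
          omega
        rw [hmm, hn10, bal1B_zero]
        exact hm0
      · have := scan1B_none k m d (8 - d).toNat 1 hfind n1 (by omega)
          (by rw [Int.ofNat_toNat]; omega)
        omega
    have hn10 : 0 ≤ n1 := by omega
    -- the binary search and the closed-form solve agree
    have hW : bsearchA k mm n1 100 0 (10^18) = solveB k mm n1 := by
      have hP0 : Pg k mm n1 0 := by unfold Pg; nlinarith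
      have hPN : ¬ Pg k mm n1 (10^18) :=
        notPg_big k mm n1 hk2 (mm_le k m d hk2 hm2 hd1) hn10
      obtain ⟨hL0, hLP, hLP1⟩ := bsearchA_boundary k mm n1 100 0 (10^18) hP0 hPN
        (by norm_num) (by norm_num)
      obtain ⟨hN0, hNP, hNP1⟩ := solveB_boundary k mm n1 hmm0
      exact Pg_uniq k mm n1 _ _ hP0 hL0 hN0 hLP hLP1 hNP hNP1
    rw [hW]
    set w := solveB k mm n1 with hw
    rw [L2₀]
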